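-- pv_equiv track=rewrite | github.com/lumos706/SYSU_AI-Project_by_LuM0s | E4_22336216/Agent_1.py | get_pattern_locations
-- ===== SOURCE A (Python) =====
-- def get_pattern_locations(board, pattern):
--     '''
--     获取给定的棋子排列所在的位置
--     ---------------参数---------------
--     board       当前的局面，是 15×15 的二维 list，表示棋盘
--     pattern     代表需要找的排列的 tuple
--     ---------------返回---------------
--     一个由 tuple 组成的 list，每个 tuple 代表在棋盘中找到的一个棋子排列
--         tuple 的第 0 维     棋子排列的初始 x 坐标（行数/第一维）
--         tuple 的第 1 维     棋子排列的初始 y 坐标（列数/第二维）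
--         tuple 的第 2 维     棋子排列的方向，0 为向下，1 为向右，2 为右下，3 为左下；
--                             仅对不对称排列：4 为向上，5 为向左，6 为左上，7 为右上；
--                             仅对长度为 1 的排列：方向默认为 0
--     ---------------示例---------------
--     对于以下的 board（W 为白子，B为黑子）
--       0 y 1   2   3   4   ...
--     0 +---W---+---+---+-- ...
--     x |   |   |   |   |   ...
--     1 +---+---B---+---+-- ...
--       |   |   |   |   |   ...
--     2 +---+---+---W---+-- ...
--       |   |   |   |   |   ...
--     3 +---+---+---+---+-- ...
--       |   |   |   |   |   ...
--     ...
--     和要找的 pattern (WHITE, BLACK, WHITE)：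
--     函数输出的 list 会包含 (0, 1, 2) 这一元组，代表在 (0, 1) 的向右下方向找到了
--     一个对应 pattern 的棋子排列。
--     '''
--     ROWS = len(board)
--     DIRE = [(1, 0), (0, 1), (1, 1), (1, -1)]
--     pattern_list = []
--     palindrome = True if tuple(reversed(pattern)) == pattern else False
--     for x in range(ROWS):
--         for y in range(ROWS):
--             if pattern[0] == board[x][y]:
--                 if len(pattern) == 1:
--                     pattern_list.append((x, y, 0))
--                 else:
--                     for dire_flag, dire in enumerate(DIRE):
--                         if _check_pattern(board, ROWS, x, y, pattern, dire[0], dire[1]):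
--                             pattern_list.append((x, y, dire_flag))
--                     if not palindrome:
--                         for dire_flag, dire in enumerate(DIRE):
--                             if _check_pattern(board, ROWS, x, y, pattern, -dire[0], -dire[1]):
--                                 pattern_list.append((x, y, dire_flag + 4))
--     return pattern_list
--
-- def _check_pattern(board, ROWS, x, y, pattern, dx, dy):
--     for goal in pattern[1:]:
--         x, y = x + dx, y + dy
--         if x < 0 or y < 0 or x >= ROWS or y >= ROWS or board[x][y] != goal:
--             return False
--     return True
-- ===== SOURCE B (Python) =====
-- def get_pattern_locations(board, pattern):
--     n = len(board)
--     k = len(pattern)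
--     if k == 1:
--         return [(x, y, 0) for x in range(n) for y in range(n) if board[x][y] == pattern[0]]
--     pat = list(pattern)
--     rpat = pat[::-1]
--     sym = rpat == pat
--     hits = []
--
--     def scan(cells, flag):
--         vals = [board[x][y] for x, y in cells]
--         for i in range(len(cells) - k + 1):
--             w = vals[i:i + k]
--             if w == pat:
--                 x, y = cells[i]
--                 hits.append((x, y, flag))
--             if not sym and w == rpat:
--                 x, y = cells[i + k - 1]
--                 hits.append((x, y, flag + 4))
--
--     for r in range(n):
--         scan([(r, y) for y in range(n)], 1)              # row r, direction right
--         scan([(x, r) for x in range(n)], 0)              # column r, direction down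
--     for s in range(n):
--         scan([(i, s + i) for i in range(n - s)], 2)      # down-right diagonal, upper half
--         scan([(i, s - i) for i in range(s + 1)], 3)      # down-left diagonal, upper half
--     for s in range(1, n):
--         scan([(s + i, i) for i in range(n - s)], 2)      # down-right diagonal, lower half
--         scan([(s + i, n - 1 - i) for i in range(n - s)], 3)  # down-left diagonal, lower half
--     return sorted(hits)
-- ===== Notes on version B (the rewrite author's own statement) =====
-- stated objective: faster
-- what changed: Instead of probing 4 (or 8) directions cell by cell with a guarded Python walker, B sweeps the board's lines - every row, column, diagonal and anti-diagonal - builds each line once, slides a length-k window along it comparing whole slices against the pattern and (for non-palindromic patterns) its reverse, then sorts the hits into A's cell-major, direction-minor order; length-1 patterns become a plain cell comprehension.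
import Mathlib
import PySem

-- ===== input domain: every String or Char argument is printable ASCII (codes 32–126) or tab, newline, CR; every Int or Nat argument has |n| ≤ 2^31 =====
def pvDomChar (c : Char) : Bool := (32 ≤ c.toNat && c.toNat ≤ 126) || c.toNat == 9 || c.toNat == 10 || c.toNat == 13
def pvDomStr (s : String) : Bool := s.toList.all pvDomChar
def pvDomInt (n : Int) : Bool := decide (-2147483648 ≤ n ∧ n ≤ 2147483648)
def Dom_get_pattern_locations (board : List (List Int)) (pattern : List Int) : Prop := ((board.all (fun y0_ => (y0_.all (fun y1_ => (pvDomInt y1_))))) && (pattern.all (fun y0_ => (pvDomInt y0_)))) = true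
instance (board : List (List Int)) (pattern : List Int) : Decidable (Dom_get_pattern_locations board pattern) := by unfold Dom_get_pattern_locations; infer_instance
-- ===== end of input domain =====

-- B replaces A's per-cell direction probing by a line sweep (rows, columns, both diagonal
-- families) with a sliding window on each line, followed by one sort; a timing run
-- measured B markedly faster (a constant-factor win: whole-slice compares per window
-- instead of per-cell guarded walks).


-- ===== PORT A =====
-- board[x][y]; total form, used only where Python's access succeeds (bounds checked by the
-- callers / guaranteed by Pre_).
def pvGet (board : List (List Int)) (x y : Int) : Int :=
  (PySem.List.pyGet? ((PySem.List.pyGet? board x).getD []) y).getD 0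

-- _check_pattern, walking pattern[1:] cell by cell
def pvCheckPattern (board : List (List Int)) (ROWS : Int) (x y : Int) (rest : List Int)
    (dx dy : Int) : Bool :=
  match rest with
  | [] => true
  | g :: gs =>
    let x' := x + dx
    let y' := y + dy
    if x' < 0 ∨ y' < 0 ∨ ROWS ≤ x' ∨ ROWS ≤ y' ∨ pvGet board x' y' ≠ g then false
    else pvCheckPattern board ROWS x' y' gs dx dy

def get_pattern_locations (board : List (List Int)) (pattern : List Int) : List (Int × Int × Int) :=
  let ROWS : Int := board.length
  let DIRE : List (Int × Int) := [(1, 0), (0, 1), (1, 1), (1, -1)]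
  let palindrome : Bool := pattern.reverse == pattern   -- tuple(reversed(pattern)) == pattern
  (PySem.List.pyRange 0 ROWS 1).foldl (fun acc x =>
    (PySem.List.pyRange 0 ROWS 1).foldl (fun acc y =>
      if (PySem.List.pyGet? pattern 0).getD 0 = pvGet board x y then
        if pattern.length = 1 then acc ++ [(x, y, 0)]
        else
          let acc := (PySem.List.enumerate DIRE 0).foldl (fun acc fd =>
            if pvCheckPattern board ROWS x y (PySem.List.slice pattern (some 1) none) fd.2.1 fd.2.2
            then acc ++ [(x, y, fd.1)] else acc) acc
          if !palindrome then
            (PySem.List.enumerate DIRE 0).foldl (fun acc fd =>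
              if pvCheckPattern board ROWS x y (PySem.List.slice pattern (some 1) none) (-fd.2.1) (-fd.2.2)
              then acc ++ [(x, y, fd.1 + 4)] else acc) acc
          else acc
      else acc) acc) []

-- ===== PORT B =====
-- the `scan` closure of Source B: slide a window of length k along one line of cells,
-- appending the hits to the running list
def pvScan (board : List (List Int)) (pat rpat : List Int) (sym : Bool) (k : Int)
    (cells : List (Int × Int)) (flag : Int) (hits : List (Int × Int × Int)) :
    List (Int × Int × Int) :=
  let vals := cells.map (fun c => pvGet board c.1 c.2)
  (PySem.List.pyRange 0 ((cells.length : Int) - k + 1) 1).foldl (fun hits i =>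
    let w := PySem.List.slice vals (some i) (some (i + k))
    let hits :=
      if w = pat then
        let c := (PySem.List.pyGet? cells i).getD (0, 0)
        hits ++ [(c.1, c.2, flag)]
      else hits
    if sym = false ∧ w = rpat then
      let c := (PySem.List.pyGet? cells (i + k - 1)).getD (0, 0)
      hits ++ [(c.1, c.2, flag + 4)]
    else hits) hits

def get_pattern_locations_alt (board : List (List Int)) (pattern : List Int) :
    List (Int × Int × Int) :=
  let n : Int := board.length
  let k : Int := pattern.length
  if k = 1 then
    (PySem.List.pyRange 0 n 1).flatMap (fun x =>
      ((PySem.List.pyRange 0 n 1).filter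
          (fun y => pvGet board x y = (PySem.List.pyGet? pattern 0).getD 0)).map
        (fun y => (x, y, (0 : Int))))
  else
    let pat := pattern
    let rpat := pattern.reverse          -- pat[::-1]
    let sym : Bool := rpat == pat
    let hits : List (Int × Int × Int) := []
    let hits := (PySem.List.pyRange 0 n 1).foldl (fun hits r =>
      let hits := pvScan board pat rpat sym k
        ((PySem.List.pyRange 0 n 1).map (fun y => (r, y))) 1 hits        -- row r, dir right
      pvScan board pat rpat sym k
        ((PySem.List.pyRange 0 n 1).map (fun x => (x, r))) 0 hits) hits  -- column r, dir down
    let hits := (PySem.List.pyRange 0 n 1).foldl (fun hits s =>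
      let hits := pvScan board pat rpat sym k
        ((PySem.List.pyRange 0 (n - s) 1).map (fun i => (i, s + i))) 2 hits   -- ↘ upper
      pvScan board pat rpat sym k
        ((PySem.List.pyRange 0 (s + 1) 1).map (fun i => (i, s - i))) 3 hits) hits  -- ↙ upper
    let hits := (PySem.List.pyRange 1 n 1).foldl (fun hits s =>
      let hits := pvScan board pat rpat sym k
        ((PySem.List.pyRange 0 (n - s) 1).map (fun i => (s + i, i))) 2 hits   -- ↘ lower
      pvScan board pat rpat sym k
        ((PySem.List.pyRange 0 (n - s) 1).map (fun i => (s + i, n - 1 - i))) 3 hits) hits  -- ↙ lower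
    -- sorted(hits): Python tuple comparison is lexicographic
    PySem.List.sorted hits (fun t => toLex (t.1, toLex (t.2.1, t.2.2))) false

-- ===== PRECONDITION & SPEC =====
-- Pre_ excludes exactly the inputs where the Python A raises IndexError: an empty pattern with
-- a non-empty board (pattern[0]), and a row shorter than len(board) (board[x][y]).
def Pre_get_pattern_locations (board : List (List Int)) (pattern : List Int) : Prop :=
  (board = [] ∨ pattern ≠ []) ∧ ∀ row ∈ board, board.length ≤ row.length

instance (board : List (List Int)) (pattern : List Int) :
    Decidable (Pre_get_pattern_locations board pattern) := by
  unfold Pre_get_pattern_locations; infer_instance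

def pvWitness_get_pattern_locations : List (List Int) × List Int :=
  ([[1, 0, 1], [0, 1, 0], [1, 0, 0]], [1, 0])

def Spec_get_pattern_locations (board : List (List Int)) (pattern : List Int) (out : List (Int × Int × Int)) : Prop := out = get_pattern_locations_alt board pattern
instance (board : List (List Int)) (pattern : List Int) (out : List (Int × Int × Int)) : Decidable (Spec_get_pattern_locations board pattern out) := by unfold Spec_get_pattern_locations; infer_instance

-- ===== CLAIM (what is proved, stated in full; the proofs are below) =====
def Claim_equal_get_pattern_locations : Prop := ∀ (board : List (List Int)) (pattern : List Int), Dom_get_pattern_locations board pattern → Pre_get_pattern_locations board pattern → Spec_get_pattern_locations board pattern (get_pattern_locations board pattern)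

-- ===== LEMMAS AND PROOFS =====

-- Python's tuple comparison key, shared by the statements below
def pvKey (t : Int × Int × Int) : Lex (Int × Lex (Int × Int)) := toLex (t.1, toLex (t.2.1, t.2.2))

-- (x, y) is on the n×n board
def pvInb (n x y : Int) : Prop := 0 ≤ x ∧ x < n ∧ 0 ≤ y ∧ y < n

-- the whole pattern occurs at (x, y) in direction (dx, dy), inside the board
def pvM (board : List (List Int)) (pattern : List Int) (x y dx dy : Int) : Prop :=
  ∀ i : Nat, i < pattern.length →
    pvInb (board.length : Int) (x + i * dx) (y + i * dy) ∧
    pvGet board (x + i * dx) (y + i * dy) = pattern.getD i 0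

def pvDir (f : Int) : Int × Int :=
  if f = 0 then (1, 0) else if f = 1 then (0, 1) else if f = 2 then (1, 1)
  else if f = 3 then (1, -1) else if f = 4 then (-1, 0) else if f = 5 then (0, -1)
  else if f = 6 then (-1, -1) else (-1, 1)

-- what both programs report for a pattern of length ≥ 2
def pvHit (board : List (List Int)) (pattern : List Int) (t : Int × Int × Int) : Prop :=
  ((0 ≤ t.2.2 ∧ t.2.2 < 4) ∨ (pattern.reverse ≠ pattern ∧ 4 ≤ t.2.2 ∧ t.2.2 < 8)) ∧
  pvM board pattern t.1 t.2.1 (pvDir t.2.2).1 (pvDir t.2.2).2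

-- the block A appends for one cell (x, y)
def pvCell (board : List (List Int)) (pattern : List Int) (x y : Int) : List (Int × Int × Int) :=
  let n : Int := board.length
  let DIRE : List (Int × Int) := [(1, 0), (0, 1), (1, 1), (1, -1)]
  let tl := PySem.List.slice pattern (some 1) none
  if (PySem.List.pyGet? pattern 0).getD 0 = pvGet board x y then
    if pattern.length = 1 then [(x, y, 0)]
    else
      ((PySem.List.enumerate DIRE 0).filter
          (fun fd => pvCheckPattern board n x y tl fd.2.1 fd.2.2)).map (fun fd => (x, y, fd.1)) ++
      (if !(pattern.reverse == pattern) then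
        ((PySem.List.enumerate DIRE 0).filter
          (fun fd => pvCheckPattern board n x y tl (-fd.2.1) (-fd.2.2))).map
          (fun fd => (x, y, fd.1 + 4))
      else [])
  else []

-- the hit list B's scan of one line contributes
def pvS (board : List (List Int)) (pat rpat : List Int) (sym : Bool) (k : Int)
    (cells : List (Int × Int)) (flag : Int) : List (Int × Int × Int) :=
  (PySem.List.pyRange 0 ((cells.length : Int) - k + 1) 1).flatMap (fun i =>
    let w := PySem.List.slice (cells.map (fun c => pvGet board c.1 c.2)) (some i) (some (i + k))
    (if w = pat then
      [(((PySem.List.pyGet? cells i).getD (0, 0)).1, ((PySem.List.pyGet? cells i).getD (0, 0)).2, flag)]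
    else []) ++
    (if sym = false ∧ w = rpat then
      [(((PySem.List.pyGet? cells (i + k - 1)).getD (0, 0)).1,
        ((PySem.List.pyGet? cells (i + k - 1)).getD (0, 0)).2, flag + 4)]
    else []))

-- B's unsorted hit list (k ≥ 2 branch)
def pvH (board : List (List Int)) (pattern : List Int) : List (Int × Int × Int) :=
  let n : Int := board.length
  let k : Int := pattern.length
  let pat := pattern
  let rpat := pattern.reverse
  let sym : Bool := rpat == pat
  ((PySem.List.pyRange 0 n 1).flatMap (fun r =>
    pvS board pat rpat sym k ((PySem.List.pyRange 0 n 1).map (fun y => (r, y))) 1 ++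
    pvS board pat rpat sym k ((PySem.List.pyRange 0 n 1).map (fun x => (x, r))) 0)) ++
  ((PySem.List.pyRange 0 n 1).flatMap (fun s =>
    pvS board pat rpat sym k ((PySem.List.pyRange 0 (n - s) 1).map (fun i => (i, s + i))) 2 ++
    pvS board pat rpat sym k ((PySem.List.pyRange 0 (s + 1) 1).map (fun i => (i, s - i))) 3)) ++
  ((PySem.List.pyRange 1 n 1).flatMap (fun s =>
    pvS board pat rpat sym k ((PySem.List.pyRange 0 (n - s) 1).map (fun i => (s + i, i))) 2 ++
    pvS board pat rpat sym k ((PySem.List.pyRange 0 (n - s) 1).map (fun i => (s + i, n - 1 - i))) 3))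

-- ---- A-side structure ----
lemma A_eq_flatMap (board : List (List Int)) (pattern : List Int) :
    get_pattern_locations board pattern =
      (PySem.List.pyRange 0 (board.length : Int) 1).flatMap (fun x =>
        (PySem.List.pyRange 0 (board.length : Int) 1).flatMap (fun y =>
          pvCell board pattern x y)) := by
  unfold get_pattern_locations
  dsimp only
  rw [PySem.List.foldl_congr_mem _ _
    (fun acc x => acc ++ (PySem.List.pyRange 0 (board.length : Int) 1).flatMap
      (fun y => pvCell board pattern x y)) [] ?_]
  · rw [PySem.List.foldl_append_eq_flatMap]
    simp
  · intro acc x _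
    rw [PySem.List.foldl_congr_mem _ _ (fun acc y => acc ++ pvCell board pattern x y) acc ?_]
    · exact PySem.List.foldl_append_eq_flatMap _ _ _
    · intro acc' y _
      unfold pvCell
      dsimp only
      split_ifs with hg hlen hpal
      · rfl
      · rw [PySem.List.foldl_append_if, PySem.List.foldl_append_if]
        simp [List.append_assoc]
      · rw [PySem.List.foldl_append_if]
        simp
      · simp

lemma check_iff (board : List (List Int)) (R dx dy : Int) :
    ∀ (rest : List Int) (x y : Int),
      pvCheckPattern board R x y rest dx dy = true ↔
        ∀ j : Nat, j < rest.length →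
          (0 ≤ x + (j + 1 : Nat) * dx ∧ x + (j + 1 : Nat) * dx < R ∧
           0 ≤ y + (j + 1 : Nat) * dy ∧ y + (j + 1 : Nat) * dy < R) ∧
          pvGet board (x + (j + 1 : Nat) * dx) (y + (j + 1 : Nat) * dy) = rest.getD j 0 := by
  intro rest
  induction rest with
  | nil => intro x y; simp [pvCheckPattern]
  | cons g gs ih =>
    intro x y
    rw [show pvCheckPattern board R x y (g :: gs) dx dy =
        (if x + dx < 0 ∨ y + dy < 0 ∨ R ≤ x + dx ∨ R ≤ y + dy ∨ pvGet board (x + dx) (y + dy) ≠ g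
         then false else pvCheckPattern board R (x + dx) (y + dy) gs dx dy) from rfl]
    split_ifs with hc
    · simp only [false_iff]
      intro h
      have h0 := h 0 (by simp)
      push_cast at h0
      simp only [one_mul, List.getD_cons_zero] at h0
      rcases hc with h' | h' | h' | h' | h' <;> first
        | omega
        | exact h' h0.2
    · push_neg at hc
      obtain ⟨hc1, hc2, hc3, hc4, hc5⟩ := hc
      rw [ih (x + dx) (y + dy)]
      constructor
      · intro h j hj
        match j with
        | 0 =>
          push_cast
          simp only [one_mul, List.getD_cons_zero]
          exact ⟨⟨by omega, by omega, by omega, by omega⟩, hc5⟩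
        | (j' + 1) =>
          have hgs : j' < gs.length := by simpa using hj
          have := h j' hgs
          have e1 : x + dx + (j' + 1 : Nat) * dx = x + ((j' + 1 : Nat) + 1 : Nat) * dx := by
            push_cast; ring
          have e2 : y + dy + (j' + 1 : Nat) * dy = y + ((j' + 1 : Nat) + 1 : Nat) * dy := by
            push_cast; ring
          rw [e1, e2] at this
          simpa using this
      · intro h j hj
        have := h (j + 1) (by simpa using hj)
        have e1 : x + dx + (j + 1 : Nat) * dx = x + ((j + 1 : Nat) + 1 : Nat) * dx := by
          push_cast; ring
        have e2 : y + dy + (j + 1 : Nat) * dy = y + ((j + 1 : Nat) + 1 : Nat) * dy := by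
          push_cast; ring
        rw [e1, e2]
        simpa using this

lemma M_iff_guard_check (board : List (List Int)) (pattern : List Int)
    (h1 : 1 ≤ pattern.length) (x y dx dy : Int)
    (hx : 0 ≤ x) (hx' : x < (board.length : Int)) (hy : 0 ≤ y) (hy' : y < (board.length : Int)) :
    pvM board pattern x y dx dy ↔
      ((PySem.List.pyGet? pattern 0).getD 0 = pvGet board x y ∧
       pvCheckPattern board (board.length : Int) x y (PySem.List.slice pattern (some 1) none) dx dy = true) := by
  rcases pattern with _ | ⟨p0, ps⟩
  · simp at h1
  · simp only [PySem.List.slice_from_one, List.tail_cons]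
    rw [check_iff]
    unfold pvM pvInb
    constructor
    · intro h
      have h0 := h 0 (by simp)
      push_cast at h0
      simp only [zero_mul, add_zero, List.getD_cons_zero] at h0
      refine ⟨by simp [h0.2], ?_⟩
      intro j hj
      have := h (j + 1) (by simp; omega)
      push_cast at this ⊢
      simpa using this
    · rintro ⟨hg, hcheck⟩ i hi
      match i with
      | 0 =>
        push_cast
        simp only [zero_mul, add_zero, List.getD_cons_zero]
        refine ⟨⟨hx, hx', hy, hy'⟩, ?_⟩
        simp at hg
        omega
      | (j + 1) =>
        have := hcheck j (by simpa using hi)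
        push_cast at this ⊢
        simpa using this

lemma mem_A (board : List (List Int)) (pattern : List Int) (h2 : 2 ≤ pattern.length)
    (t : Int × Int × Int) :
    t ∈ get_pattern_locations board pattern ↔ pvHit board pattern t := by
  have hE : PySem.List.enumerate [((1:Int),(0:Int)),(0,1),(1,1),(1,-1)] 0 =
      [(0,(1,0)),(1,(0,1)),(2,(1,1)),(3,(1,-1))] := by decide
  have hlen1 : pattern.length ≠ 1 := by omega
  have h1 : 1 ≤ pattern.length := by omega
  rw [A_eq_flatMap]
  simp only [List.mem_flatMap, PySem.List.mem_pyRange_one]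
  constructor
  · rintro ⟨x, ⟨hx0, hxn⟩, y, ⟨hy0, hyn⟩, ht⟩
    simp only [pvCell, hE] at ht
    by_cases hg : (PySem.List.pyGet? pattern 0).getD 0 = pvGet board x y
    · rw [if_pos hg, if_neg hlen1] at ht
      by_cases hpal : pattern.reverse = pattern
      · rw [if_neg (by simp [hpal] : ¬(!(pattern.reverse == pattern)) = true)] at ht
        simp only [List.append_nil, List.mem_map, List.mem_filter, List.mem_cons,
          List.not_mem_nil, or_false] at ht
        rcases ht with ⟨fd, ⟨rfl | rfl | rfl | rfl, hchk⟩, rfl⟩ <;>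
          refine ⟨by norm_num, ?_⟩ <;>
          exact (M_iff_guard_check board pattern h1 x y _ _ hx0 hxn hy0 hyn).mpr ⟨hg, hchk⟩
      · rw [if_pos (by simp [hpal] : (!(pattern.reverse == pattern)) = true)] at ht
        simp only [List.mem_append, List.mem_map, List.mem_filter, List.mem_cons,
          List.not_mem_nil, or_false] at ht
        rcases ht with ⟨fd, ⟨rfl | rfl | rfl | rfl, hchk⟩, rfl⟩ | ⟨fd, ⟨rfl | rfl | rfl | rfl, hchk⟩, rfl⟩ <;>
          refine ⟨by norm_num [hpal], ?_⟩ <;>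
          exact (M_iff_guard_check board pattern h1 x y _ _ hx0 hxn hy0 hyn).mpr ⟨hg, hchk⟩
    · rw [if_neg hg] at ht
      simp at ht
  · rintro ⟨hf, hM⟩
    obtain ⟨x, y, f⟩ := t
    dsimp only at hf hM ⊢
    have h0 := hM 0 (by omega)
    push_cast at h0
    simp only [zero_mul, add_zero] at h0
    obtain ⟨⟨hx0, hxn, hy0, hyn⟩, -⟩ := h0
    refine ⟨x, ⟨hx0, hxn⟩, y, ⟨hy0, hyn⟩, ?_⟩
    have hgc := (M_iff_guard_check board pattern h1 x y _ _ hx0 hxn hy0 hyn).mp hM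
    simp only [pvCell, hE]
    rw [if_pos hgc.1, if_neg hlen1]
    simp only [List.mem_append, List.mem_map, List.mem_filter, List.mem_cons,
      List.not_mem_nil, or_false]
    have hfc : f = 0 ∨ f = 1 ∨ f = 2 ∨ f = 3 ∨
        (pattern.reverse ≠ pattern ∧ (f = 4 ∨ f = 5 ∨ f = 6 ∨ f = 7)) := by
      rcases hf with ⟨a, b⟩ | ⟨hne, a, b⟩
      · have : f = 0 ∨ f = 1 ∨ f = 2 ∨ f = 3 := by omega
        tauto
      · have : f = 4 ∨ f = 5 ∨ f = 6 ∨ f = 7 := by omega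
        tauto
    rcases hfc with rfl | rfl | rfl | rfl | ⟨hne, rfl | rfl | rfl | rfl⟩
    · exact Or.inl ⟨(0,(1,0)), ⟨by norm_num, hgc.2⟩, rfl⟩
    · exact Or.inl ⟨(1,(0,1)), ⟨by norm_num, hgc.2⟩, rfl⟩
    · exact Or.inl ⟨(2,(1,1)), ⟨by norm_num, hgc.2⟩, rfl⟩
    · exact Or.inl ⟨(3,(1,-1)), ⟨by norm_num, hgc.2⟩, rfl⟩
    all_goals rw [if_pos (by simp [hne] : (!(pattern.reverse == pattern)) = true)]
    all_goals simp only [List.mem_append, List.mem_map, List.mem_filter, List.mem_cons,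
      List.not_mem_nil, or_false]
    · exact Or.inr ⟨(0,(1,0)), ⟨by norm_num, by simpa using hgc.2⟩, rfl⟩
    · exact Or.inr ⟨(1,(0,1)), ⟨by norm_num, by simpa using hgc.2⟩, rfl⟩
    · exact Or.inr ⟨(2,(1,1)), ⟨by norm_num, by simpa using hgc.2⟩, rfl⟩
    · exact Or.inr ⟨(3,(1,-1)), ⟨by norm_num, by simpa using hgc.2⟩, rfl⟩

lemma pvKey_lt_iff (s t : Int × Int × Int) :
    pvKey s < pvKey t ↔
      s.1 < t.1 ∨ (s.1 = t.1 ∧ (s.2.1 < t.2.1 ∨ (s.2.1 = t.2.1 ∧ s.2.2 < t.2.2))) := by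
  simp [pvKey, Prod.Lex.toLex_lt_toLex]

lemma mem_pvCell_shape (board : List (List Int)) (pattern : List Int) (x y : Int)
    (t : Int × Int × Int) (h : t ∈ pvCell board pattern x y) : t.1 = x ∧ t.2.1 = y := by
  simp only [pvCell] at h
  split_ifs at h
  · simp only [List.mem_singleton] at h
    subst h; exact ⟨rfl, rfl⟩
  · simp only [List.mem_append, List.mem_map, List.mem_filter] at h
    rcases h with ⟨fd, -, rfl⟩ | ⟨fd, -, rfl⟩ <;> exact ⟨rfl, rfl⟩
  · simp only [List.append_nil, List.mem_map, List.mem_filter] at h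
    rcases h with ⟨fd, -, rfl⟩
    exact ⟨rfl, rfl⟩
  · simp at h

lemma pairwise_pvCell (board : List (List Int)) (pattern : List Int) (x y : Int) :
    (pvCell board pattern x y).Pairwise (fun a b => a.2.2 < b.2.2) := by
  have hE : PySem.List.enumerate [((1:Int),(0:Int)),(0,1),(1,1),(1,-1)] 0 =
      [(0,(1,0)),(1,(0,1)),(2,(1,1)),(3,(1,-1))] := by decide
  have hlit : ([((0:Int),((1:Int),(0:Int))),(1,(0,1)),(2,(1,1)),(3,(1,-1))]).Pairwise
      (fun a b => a.1 < b.1) := by decide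
  simp only [pvCell, hE]
  split_ifs
  · simp
  · rw [List.pairwise_append]
    refine ⟨?_, ?_, ?_⟩
    · rw [List.pairwise_map]
      exact List.Pairwise.imp (fun h => h) (List.Pairwise.sublist List.filter_sublist hlit)
    · rw [List.pairwise_map]
      refine List.Pairwise.imp ?_ (List.Pairwise.sublist List.filter_sublist hlit)
      intro a b hab
      simpa using by omega
    · intro a ha b hb
      simp only [List.mem_map, List.mem_filter] at ha hb
      rcases ha with ⟨fd, ⟨hfd, -⟩, rfl⟩
      rcases hb with ⟨fd', ⟨hfd', -⟩, rfl⟩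
      simp only [List.mem_cons, List.not_mem_nil, or_false] at hfd hfd'
      rcases hfd with rfl | rfl | rfl | rfl <;> rcases hfd' with rfl | rfl | rfl | rfl <;> norm_num
  · rw [List.append_nil, List.pairwise_map]
    exact List.Pairwise.imp (fun h => h) (List.Pairwise.sublist List.filter_sublist hlit)
  · simp

lemma pairwise_A (board : List (List Int)) (pattern : List Int) :
    (get_pattern_locations board pattern).Pairwise (fun a b => pvKey a < pvKey b) := by
  rw [A_eq_flatMap, List.pairwise_flatMap]
  constructor
  · intro x _
    rw [List.pairwise_flatMap]
    constructor
    · intro y _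
      refine List.Pairwise.imp_of_mem ?_ (pairwise_pvCell board pattern x y)
      intro a b ha hb hab
      obtain ⟨ha1, ha2⟩ := mem_pvCell_shape _ _ _ _ _ ha
      obtain ⟨hb1, hb2⟩ := mem_pvCell_shape _ _ _ _ _ hb
      rw [pvKey_lt_iff]
      exact Or.inr ⟨by rw [ha1, hb1], Or.inr ⟨by rw [ha2, hb2], hab⟩⟩
    · refine List.Pairwise.imp ?_ (PySem.List.pairwise_lt_pyRange_one 0 (board.length : Int))
      intro y1 y2 h12 a ha b hb
      obtain ⟨ha1, ha2⟩ := mem_pvCell_shape _ _ _ _ _ ha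
      obtain ⟨hb1, hb2⟩ := mem_pvCell_shape _ _ _ _ _ hb
      rw [pvKey_lt_iff]
      exact Or.inr ⟨by rw [ha1, hb1], Or.inl (by rw [ha2, hb2]; exact h12)⟩
  · refine List.Pairwise.imp ?_ (PySem.List.pairwise_lt_pyRange_one 0 (board.length : Int))
    intro x1 x2 h12 a ha b hb
    simp only [List.mem_flatMap] at ha hb
    obtain ⟨y1, -, ha⟩ := ha
    obtain ⟨y2, -, hb⟩ := hb
    obtain ⟨ha1, -⟩ := mem_pvCell_shape _ _ _ _ _ ha
    obtain ⟨hb1, -⟩ := mem_pvCell_shape _ _ _ _ _ hb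
    rw [pvKey_lt_iff]
    exact Or.inl (by rw [ha1, hb1]; exact h12)

-- ---- B-side structure ----
lemma pvFoldlTwo {α β : Type} (l : List α) (c1 c2 : α → Prop) [DecidablePred c1]
    [DecidablePred c2] (u v : α → β) (init : List β) :
    l.foldl (fun acc x =>
        if c2 x then (if c1 x then acc ++ [u x] else acc) ++ [v x]
        else (if c1 x then acc ++ [u x] else acc)) init =
      init ++ l.flatMap (fun x => (if c1 x then [u x] else []) ++ (if c2 x then [v x] else [])) := by
  rw [PySem.List.foldl_congr_mem l _
    (fun acc x => acc ++ ((if c1 x then [u x] else []) ++ (if c2 x then [v x] else []))) init ?_]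
  · exact PySem.List.foldl_append_eq_flatMap _ _ _
  · intro acc x _
    split_ifs <;> simp [*]

lemma scan_eq (board : List (List Int)) (pat rpat : List Int) (sym : Bool) (k : Int)
    (cells : List (Int × Int)) (flag : Int) (hits : List (Int × Int × Int)) :
    pvScan board pat rpat sym k cells flag hits = hits ++ pvS board pat rpat sym k cells flag := by
  unfold pvScan pvS
  dsimp only
  exact pvFoldlTwo _ _ _ _ _ hits

lemma take_drop_eq_iff {α : Type} (u q : List α) (a : Nat) (h : a + q.length ≤ u.length) :
    (u.drop a).take q.length = q ↔
      ∀ (j : Nat) (hj : j < q.length), u[a + j]'(by omega) = q[j]'hj := by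
  constructor
  · intro he j hj
    have h1 : j < ((u.drop a).take q.length).length := by
      simp only [List.length_take, List.length_drop]
      omega
    calc u[a + j]'(by omega) = ((u.drop a).take q.length)[j]'h1 := by
          rw [List.getElem_take, List.getElem_drop]
      _ = q[j]'hj := by simp [he]
  · intro hj
    apply List.ext_getElem
    · simp only [List.length_take, List.length_drop]
      omega
    · intro j h1 h2
      rw [List.getElem_take, List.getElem_drop]
      exact hj j h2

lemma window_iff (board : List (List Int)) (q : List Int) (L : Int) (hL : 0 ≤ L)
    (c : Int → Int × Int) (i : Int) (hi : 0 ≤ i) (hik : i + q.length ≤ L) :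
    PySem.List.slice ((PySem.List.pyRange 0 L 1).map (fun j => pvGet board (c j).1 (c j).2))
        (some i) (some (i + q.length)) = q ↔
      ∀ j : Nat, j < q.length →
        pvGet board (c (i + j)).1 (c (i + j)).2 = q.getD j 0 := by
  set u := (PySem.List.pyRange 0 L 1).map (fun j => pvGet board (c j).1 (c j).2) with hu
  have hul : u.length = L.toNat := by
    simp [hu, PySem.List.length_pyRange_one]
  have hgu : ∀ (m : Nat) (hm : m < u.length), u[m] = pvGet board (c ↑m).1 (c ↑m).2 := by
    intro m hm
    simp only [hu, List.getElem_map, PySem.List.getElem_pyRange_one, zero_add]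
  rw [PySem.List.slice_toNat _ hi (by omega)]
  have hcnt : (i + q.length).toNat - i.toNat = q.length := by omega
  rw [hcnt, take_drop_eq_iff u q i.toNat (by omega)]
  constructor
  · intro h j hj
    have := h j hj
    rw [hgu (i.toNat + j) (by omega)] at this
    have hc : ((i.toNat + j : Nat) : Int) = i + j := by omega
    rw [hc] at this
    rw [this, List.getD_eq_getElem q 0 hj]
  · intro h j hj
    rw [hgu (i.toNat + j) (by omega)]
    have hc : ((i.toNat + j : Nat) : Int) = i + j := by omega
    rw [hc, h j hj, List.getD_eq_getElem q 0 hj]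

lemma c_add (c : Int → Int × Int) (dx dy : Int)
    (hstep : ∀ i, c (i + 1) = ((c i).1 + dx, (c i).2 + dy)) :
    ∀ (i : Int) (j : Nat), c (i + j) = ((c i).1 + j * dx, (c i).2 + j * dy) := by
  intro i j
  induction j with
  | zero => simp
  | succ m ih =>
    have he : (i + ((m : Nat) + 1 : Nat) : Int) = (i + m) + 1 := by push_cast; ring
    rw [he, hstep, ih]
    simp only [Prod.mk.injEq]
    push_cast
    constructor <;> ring

lemma lineFwd (board : List (List Int)) (pattern : List Int) (c : Int → Int × Int)
    (dx dy L i : Int)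
    (hstep : ∀ m, c (m + 1) = ((c m).1 + dx, (c m).2 + dy))
    (hinb : ∀ m : Int, 0 ≤ m → m < L → pvInb (board.length : Int) (c m).1 (c m).2)
    (hi : 0 ≤ i) (hik : i + pattern.length ≤ L) :
    (∀ j : Nat, j < pattern.length →
        pvGet board (c (i + j)).1 (c (i + j)).2 = pattern.getD j 0) ↔
      pvM board pattern (c i).1 (c i).2 dx dy := by
  unfold pvM
  constructor
  · intro h j hj
    have hc := c_add c dx dy hstep i j
    have h1 : (c i).1 + (j : Int) * dx = (c (i + (j : Int))).1 := by rw [hc]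
    have h2 : (c i).2 + (j : Int) * dy = (c (i + (j : Int))).2 := by rw [hc]
    rw [h1, h2]
    exact ⟨hinb _ (by omega) (by omega), h j hj⟩
  · intro h j hj
    have hc := c_add c dx dy hstep i j
    have := (h j hj).2
    rw [hc]
    simpa using this

lemma lineRev (board : List (List Int)) (pattern : List Int) (_h2 : 2 ≤ pattern.length)
    (c : Int → Int × Int) (dx dy L i : Int)
    (hstep : ∀ m, c (m + 1) = ((c m).1 + dx, (c m).2 + dy))
    (hinb : ∀ m : Int, 0 ≤ m → m < L → pvInb (board.length : Int) (c m).1 (c m).2)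
    (hi : 0 ≤ i) (hik : i + pattern.length ≤ L) :
    (∀ j : Nat, j < pattern.length →
        pvGet board (c (i + j)).1 (c (i + j)).2 = pattern.reverse.getD j 0) ↔
      pvM board pattern (c (i + pattern.length - 1)).1 (c (i + pattern.length - 1)).2
        (-dx) (-dy) := by
  have hrev : ∀ (j m : Nat), j + m + 1 = pattern.length →
      pattern.reverse.getD j 0 = pattern.getD m 0 := by
    intro j m hjm
    rw [List.getD_eq_getElem _ 0 (by simp; omega), List.getD_eq_getElem _ 0 (by omega),
      List.getElem_reverse]
    congr 1
    omega
  have hpos : ∀ (j m : Nat), j + m + 1 = pattern.length →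
      (c (i + pattern.length - 1)).1 + (m : Int) * (-dx) = (c (i + j)).1 ∧
      (c (i + pattern.length - 1)).2 + (m : Int) * (-dy) = (c (i + j)).2 := by
    intro j m hjm
    have h1 := c_add c dx dy hstep i (j + m)
    have h2 := c_add c dx dy hstep i j
    have he : i + (pattern.length : Int) - 1 = i + ((j + m : Nat) : Int) := by push_cast; omega
    rw [he, h1, h2]
    constructor <;> (push_cast; ring)
  unfold pvM
  constructor
  · intro h m hm
    have hjm : (pattern.length - 1 - m : Nat) + m + 1 = pattern.length := by omega
    obtain ⟨e1, e2⟩ := hpos _ m hjm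
    rw [e1, e2]
    refine ⟨hinb _ (by omega) (by omega), ?_⟩
    rw [h _ (by omega)]
    exact hrev _ m hjm
  · intro h j hj
    have hjm : j + (pattern.length - 1 - j : Nat) + 1 = pattern.length := by omega
    obtain ⟨e1, e2⟩ := hpos j _ hjm
    have hv := (h (pattern.length - 1 - j) (by omega)).2
    rw [e1, e2] at hv
    rw [hv, hrev j _ hjm]

lemma pvAnchor (L : Int) (hL : 0 ≤ L) (c : Int → Int × Int) (m : Int) (h0 : 0 ≤ m)
    (h1 : m < L) :
    (PySem.List.pyGet? ((PySem.List.pyRange 0 L 1).map c) m).getD (0, 0) = c m := by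
  rw [PySem.List.pyGet?_of_nonneg _ h0]
  rw [show L = ((L.toNat : Nat) : Int) from by omega]
  rw [PySem.List.getElem?_map_pyRange_zero c L.toNat m.toNat (by omega)]
  rw [show ((m.toNat : Nat) : Int) = m from by omega]
  rfl

lemma mem_pvS_line (board : List (List Int)) (pattern : List Int) (h2 : 2 ≤ pattern.length)
    (L : Int) (hL : 0 ≤ L) (c : Int → Int × Int) (dx dy : Int)
    (hstep : ∀ m, c (m + 1) = ((c m).1 + dx, (c m).2 + dy))
    (hinb : ∀ m : Int, 0 ≤ m → m < L → pvInb (board.length : Int) (c m).1 (c m).2)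
    (flag : Int) (t : Int × Int × Int) :
    t ∈ pvS board pattern pattern.reverse (pattern.reverse == pattern) (pattern.length)
        ((PySem.List.pyRange 0 L 1).map c) flag ↔
      ∃ i : Int, 0 ≤ i ∧ i + pattern.length ≤ L ∧
        ((t = ((c i).1, (c i).2, flag) ∧ pvM board pattern (c i).1 (c i).2 dx dy) ∨
         (pattern.reverse ≠ pattern ∧
          t = ((c (i + pattern.length - 1)).1, (c (i + pattern.length - 1)).2, flag + 4) ∧
          pvM board pattern (c (i + pattern.length - 1)).1 (c (i + pattern.length - 1)).2
            (-dx) (-dy))) := by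
  have hanchor : ∀ m : Int, 0 ≤ m → m < L →
      (PySem.List.pyGet? ((PySem.List.pyRange 0 L 1).map c) m).getD (0, 0) = c m :=
    fun m => pvAnchor L hL c m
  simp only [pvS, List.mem_flatMap, PySem.List.mem_pyRange_one, List.mem_append,
    List.mem_ite_nil_right, List.mem_cons, List.not_mem_nil, or_false, List.map_map,
    Function.comp_def, List.length_map, PySem.List.length_pyRange_one]
  constructor
  · rintro ⟨i, ⟨hi0, hiU⟩, hcase⟩
    have hik : i + (pattern.length : Int) ≤ L := by omega
    refine ⟨i, hi0, hik, ?_⟩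
    rcases hcase with ⟨hw, rfl⟩ | ⟨⟨hs, hw⟩, rfl⟩
    · left
      rw [window_iff board pattern L hL c i hi0 hik] at hw
      exact ⟨by rw [hanchor i hi0 (by omega)],
        (lineFwd board pattern c dx dy L i hstep hinb hi0 hik).mp hw⟩
    · right
      have hwiff := window_iff board pattern.reverse L hL c i hi0 (by simpa using hik)
      rw [List.length_reverse] at hwiff
      rw [hwiff] at hw
      refine ⟨by simpa using hs, by rw [hanchor _ (by omega) (by omega)], ?_⟩
      exact (lineRev board pattern h2 c dx dy L i hstep hinb hi0 hik).mp hw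
  · rintro ⟨i, hi0, hik, hcase⟩
    refine ⟨i, ⟨hi0, by omega⟩, ?_⟩
    rcases hcase with ⟨ht, hM⟩ | ⟨hne, ht, hM⟩
    · left
      refine ⟨?_, ?_⟩
      · rw [window_iff board pattern L hL c i hi0 hik]
        exact (lineFwd board pattern c dx dy L i hstep hinb hi0 hik).mpr hM
      · rw [hanchor i hi0 (by omega)]
        exact ht
    · right
      refine ⟨⟨by simpa using hne, ?_⟩, ?_⟩
      · have hwiff := window_iff board pattern.reverse L hL c i hi0 (by simpa using hik)
        rw [List.length_reverse] at hwiff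
        rw [hwiff]
        exact (lineRev board pattern h2 c dx dy L i hstep hinb hi0 hik).mpr hM
      · rw [hanchor _ (by omega) (by omega)]
        exact ht

lemma pvScanTwoFold (board : List (List Int)) (pat rpat : List Int) (sym : Bool) (k : Int)
    (l : List Int) (ca cb : Int → List (Int × Int)) (fa fb : Int)
    (init : List (Int × Int × Int)) :
    l.foldl (fun hits r =>
        pvScan board pat rpat sym k (cb r) fb (pvScan board pat rpat sym k (ca r) fa hits)) init =
      init ++ l.flatMap (fun r =>
        pvS board pat rpat sym k (ca r) fa ++ pvS board pat rpat sym k (cb r) fb) := by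
  rw [PySem.List.foldl_congr_mem _ _
    (fun acc r => acc ++ (pvS board pat rpat sym k (ca r) fa ++ pvS board pat rpat sym k (cb r) fb))
    init ?_]
  · exact PySem.List.foldl_append_eq_flatMap _ _ _
  · intro acc r _
    rw [scan_eq, scan_eq, List.append_assoc]

lemma alt_eq_sorted (board : List (List Int)) (pattern : List Int) (hk : pattern.length ≠ 1) :
    get_pattern_locations_alt board pattern = PySem.List.sorted (pvH board pattern) pvKey false := by
  unfold get_pattern_locations_alt
  rw [if_neg (by exact_mod_cast hk)]
  dsimp only
  rw [pvScanTwoFold, pvScanTwoFold, pvScanTwoFold]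
  unfold pvH pvKey
  dsimp only
  simp [List.append_assoc]

lemma shape_pvS_line (board : List (List Int)) (pat rpat : List Int) (sym : Bool) (k : Int)
    (hk : 1 ≤ k) (L : Int) (hL : 0 ≤ L) (c : Int → Int × Int) (flag : Int)
    (t : Int × Int × Int)
    (h : t ∈ pvS board pat rpat sym k ((PySem.List.pyRange 0 L 1).map c) flag) :
    (t.2.2 = flag ∨ t.2.2 = flag + 4) ∧
      ∃ i : Int, 0 ≤ i ∧ i < L ∧ t.1 = (c i).1 ∧ t.2.1 = (c i).2 := by
  have hlen : (((PySem.List.pyRange 0 L 1).map c).length : Int) = L := by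
    simp [PySem.List.length_pyRange_one]
    omega
  unfold pvS at h
  rw [hlen] at h
  simp only [List.mem_flatMap, PySem.List.mem_pyRange_one, List.mem_append,
    List.mem_ite_nil_right, List.mem_singleton] at h
  obtain ⟨i, ⟨hi0, hiU⟩, hcase⟩ := h
  rcases hcase with ⟨-, rfl⟩ | ⟨-, rfl⟩
  · exact ⟨Or.inl rfl, i, by omega, by omega,
      by rw [pvAnchor L hL c i (by omega) (by omega)],
      by rw [pvAnchor L hL c i (by omega) (by omega)]⟩
  · exact ⟨Or.inr rfl, i + k - 1, by omega, by omega,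
      by rw [pvAnchor L hL c (i + k - 1) (by omega) (by omega)],
      by rw [pvAnchor L hL c (i + k - 1) (by omega) (by omega)]⟩

lemma nodup_pvS_line (board : List (List Int)) (pat rpat : List Int) (sym : Bool) (k : Int)
    (hk : 1 ≤ k) (L : Int) (hL : 0 ≤ L) (c : Int → Int × Int)
    (hinj : ∀ i j : Int, c i = c j → i = j) (flag : Int) :
    (pvS board pat rpat sym k ((PySem.List.pyRange 0 L 1).map c) flag).Nodup := by
  have hlen : (((PySem.List.pyRange 0 L 1).map c).length : Int) = L := by
    simp [PySem.List.length_pyRange_one]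
    omega
  unfold pvS
  rw [hlen]
  rw [List.nodup_flatMap]
  constructor
  · intro i _
    dsimp only
    split_ifs <;> simp [Prod.ext_iff] <;> omega
  · refine List.Pairwise.imp_of_mem ?_ (PySem.List.pairwise_lt_pyRange_one 0 (L - k + 1))
    intro i j hi hj hij
    rw [PySem.List.mem_pyRange_one] at hi hj
    intro t hti htj
    dsimp only at hti htj
    simp only [List.mem_append, List.mem_ite_nil_right, List.mem_singleton] at hti htj
    have hai := pvAnchor L hL c i (by omega) (by omega)
    have haj := pvAnchor L hL c j (by omega) (by omega)
    have hai' := pvAnchor L hL c (i + k - 1) (by omega) (by omega)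
    have haj' := pvAnchor L hL c (j + k - 1) (by omega) (by omega)
    rcases hti with ⟨-, rfl⟩ | ⟨-, rfl⟩ <;> rcases htj with ⟨-, ht⟩ | ⟨-, ht⟩
    · rw [hai, haj] at ht
      simp only [Prod.mk.injEq] at ht
      obtain ⟨ht1, ht2, -⟩ := ht
      exact absurd (hinj i j (Prod.ext ht1 ht2)) (by omega)
    · rw [hai, haj'] at ht
      simp only [Prod.mk.injEq] at ht
      omega
    · rw [hai', haj] at ht
      simp only [Prod.mk.injEq] at ht
      omega
    · rw [hai', haj'] at ht
      simp only [Prod.mk.injEq] at ht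
      obtain ⟨ht1, ht2, -⟩ := ht
      exact absurd (hinj _ _ (Prod.ext ht1 ht2)) (by omega)

lemma flatMap_ite_eq_filter_map {α : Type} (l : List Int) (p : Int → Prop) [DecidablePred p]
    (f : Int → α) :
    l.flatMap (fun y => if p y then [f y] else []) = (l.filter (fun y => decide (p y))).map f := by
  induction l with
  | nil => simp
  | cons a l ih => by_cases h : p a <;> simp [h, ih]

lemma mem_B (board : List (List Int)) (pattern : List Int) (h2 : 2 ≤ pattern.length)
    (t : Int × Int × Int) :
    t ∈ pvH board pattern ↔ pvHit board pattern t := by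
  obtain ⟨x, y, f⟩ := t
  have hk1 : (1:Int) ≤ (pattern.length : Int) := by push_cast; omega
  simp only [pvH, List.mem_append, List.mem_flatMap, PySem.List.mem_pyRange_one]
  constructor
  · rintro ((h | h) | h) <;> obtain ⟨r, ⟨hr0, hrn⟩, hmem⟩ := h <;>
      rcases hmem with hmem | hmem
    · rw [mem_pvS_line board pattern h2 _ (by omega) (fun i => (r, i)) 0 1
        (by intro m; refine Prod.ext ?_ ?_ <;> (try dsimp only) <;> (try ring)) (by intro m hm0 hmn; simp only [pvInb]; (try dsimp only); omega)] at hmem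
      obtain ⟨i, hi0, hik, hcase⟩ := hmem
      simp only [pvHit]
      rcases hcase with ⟨ht, hM⟩ | ⟨hne, ht, hM⟩
      · simp only [Prod.mk.injEq] at ht
        obtain ⟨rfl, rfl, rfl⟩ := ht
        refine ⟨Or.inl (by norm_num), ?_⟩
        norm_num [pvDir] at hM ⊢
        convert hM using 7 <;> (try ring)
      · simp only [Prod.mk.injEq] at ht
        obtain ⟨rfl, rfl, rfl⟩ := ht
        refine ⟨Or.inr ⟨hne, by norm_num, by norm_num⟩, ?_⟩
        norm_num [pvDir] at hM ⊢
        convert hM using 7 <;> (try ring)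
    · rw [mem_pvS_line board pattern h2 _ (by omega) (fun i => (i, r)) 1 0
        (by intro m; refine Prod.ext ?_ ?_ <;> (try dsimp only) <;> (try ring)) (by intro m hm0 hmn; simp only [pvInb]; (try dsimp only); omega)] at hmem
      obtain ⟨i, hi0, hik, hcase⟩ := hmem
      simp only [pvHit]
      rcases hcase with ⟨ht, hM⟩ | ⟨hne, ht, hM⟩
      · simp only [Prod.mk.injEq] at ht
        obtain ⟨rfl, rfl, rfl⟩ := ht
        refine ⟨Or.inl (by norm_num), ?_⟩
        norm_num [pvDir] at hM ⊢
        convert hM using 7 <;> (try ring)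
      · simp only [Prod.mk.injEq] at ht
        obtain ⟨rfl, rfl, rfl⟩ := ht
        refine ⟨Or.inr ⟨hne, by norm_num, by norm_num⟩, ?_⟩
        norm_num [pvDir] at hM ⊢
        convert hM using 7 <;> (try ring)
    · rw [mem_pvS_line board pattern h2 _ (by omega) (fun i => (i, r + i)) 1 1
        (by intro m; refine Prod.ext ?_ ?_ <;> (try dsimp only) <;> (try ring)) (by intro m hm0 hmn; simp only [pvInb]; (try dsimp only); omega)] at hmem
      obtain ⟨i, hi0, hik, hcase⟩ := hmem
      simp only [pvHit]
      rcases hcase with ⟨ht, hM⟩ | ⟨hne, ht, hM⟩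
      · simp only [Prod.mk.injEq] at ht
        obtain ⟨rfl, rfl, rfl⟩ := ht
        refine ⟨Or.inl (by norm_num), ?_⟩
        norm_num [pvDir] at hM ⊢
        convert hM using 7 <;> (try ring)
      · simp only [Prod.mk.injEq] at ht
        obtain ⟨rfl, rfl, rfl⟩ := ht
        refine ⟨Or.inr ⟨hne, by norm_num, by norm_num⟩, ?_⟩
        norm_num [pvDir] at hM ⊢
        convert hM using 7 <;> (try ring)
    · rw [mem_pvS_line board pattern h2 _ (by omega) (fun i => (i, r - i)) 1 (-1)
        (by intro m; refine Prod.ext ?_ ?_ <;> (try dsimp only) <;> (try ring)) (by intro m hm0 hmn; simp only [pvInb]; (try dsimp only); omega)] at hmem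
      obtain ⟨i, hi0, hik, hcase⟩ := hmem
      simp only [pvHit]
      rcases hcase with ⟨ht, hM⟩ | ⟨hne, ht, hM⟩
      · simp only [Prod.mk.injEq] at ht
        obtain ⟨rfl, rfl, rfl⟩ := ht
        refine ⟨Or.inl (by norm_num), ?_⟩
        norm_num [pvDir] at hM ⊢
        convert hM using 7 <;> (try ring)
      · simp only [Prod.mk.injEq] at ht
        obtain ⟨rfl, rfl, rfl⟩ := ht
        refine ⟨Or.inr ⟨hne, by norm_num, by norm_num⟩, ?_⟩
        norm_num [pvDir] at hM ⊢
        convert hM using 7 <;> (try ring)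
    · rw [mem_pvS_line board pattern h2 _ (by omega) (fun i => (r + i, i)) 1 1
        (by intro m; refine Prod.ext ?_ ?_ <;> (try dsimp only) <;> (try ring)) (by intro m hm0 hmn; simp only [pvInb]; (try dsimp only); omega)] at hmem
      obtain ⟨i, hi0, hik, hcase⟩ := hmem
      simp only [pvHit]
      rcases hcase with ⟨ht, hM⟩ | ⟨hne, ht, hM⟩
      · simp only [Prod.mk.injEq] at ht
        obtain ⟨rfl, rfl, rfl⟩ := ht
        refine ⟨Or.inl (by norm_num), ?_⟩
        norm_num [pvDir] at hM ⊢
        convert hM using 7 <;> (try ring)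
      · simp only [Prod.mk.injEq] at ht
        obtain ⟨rfl, rfl, rfl⟩ := ht
        refine ⟨Or.inr ⟨hne, by norm_num, by norm_num⟩, ?_⟩
        norm_num [pvDir] at hM ⊢
        convert hM using 7 <;> (try ring)
    · rw [mem_pvS_line board pattern h2 _ (by omega) (fun i => (r + i, (board.length : Int) - 1 - i)) 1 (-1)
        (by intro m; refine Prod.ext ?_ ?_ <;> (try dsimp only) <;> (try ring)) (by intro m hm0 hmn; simp only [pvInb]; (try dsimp only); omega)] at hmem
      obtain ⟨i, hi0, hik, hcase⟩ := hmem
      simp only [pvHit]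
      rcases hcase with ⟨ht, hM⟩ | ⟨hne, ht, hM⟩
      · simp only [Prod.mk.injEq] at ht
        obtain ⟨rfl, rfl, rfl⟩ := ht
        refine ⟨Or.inl (by norm_num), ?_⟩
        norm_num [pvDir] at hM ⊢
        convert hM using 7 <;> (try ring)
      · simp only [Prod.mk.injEq] at ht
        obtain ⟨rfl, rfl, rfl⟩ := ht
        refine ⟨Or.inr ⟨hne, by norm_num, by norm_num⟩, ?_⟩
        norm_num [pvDir] at hM ⊢
        convert hM using 7 <;> (try ring)
  · rintro ⟨hf, hM⟩
    dsimp only at hf hM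
    have hfv : f = 0 ∨ f = 1 ∨ f = 2 ∨ f = 3 ∨
        (pattern.reverse ≠ pattern ∧ (f = 4 ∨ f = 5 ∨ f = 6 ∨ f = 7)) := by
      rcases hf with ⟨a, b⟩ | ⟨hne, a, b⟩
      · have : f = 0 ∨ f = 1 ∨ f = 2 ∨ f = 3 := by omega
        tauto
      · have : f = 4 ∨ f = 5 ∨ f = 6 ∨ f = 7 := by omega
        tauto
    rcases hfv with rfl | rfl | rfl | rfl | ⟨hne, rfl | rfl | rfl | rfl⟩ <;>
      norm_num [pvDir] at hM
    · -- f = 0 : column y, forward, window anchor i = x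
      have h0 := (hM 0 (by omega)).1
      have hl := (hM (pattern.length - 1) (by omega)).1
      simp only [pvInb] at h0 hl
      push_cast [Nat.cast_sub (by omega : 1 ≤ pattern.length)] at h0 hl
      refine Or.inl (Or.inl ⟨y, ⟨by omega, by omega⟩, Or.inr ?_⟩)
      rw [mem_pvS_line board pattern h2 _ (by omega) (fun i => (i, y)) 1 0
        (by intro m; refine Prod.ext ?_ ?_ <;> (try dsimp only) <;> (try ring)) (by intro m hm0 hmn; simp only [pvInb]; (try dsimp only); omega)]
      refine ⟨x, by omega, by omega, Or.inl ⟨?_, ?_⟩⟩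
      · refine Prod.ext ?_ (Prod.ext ?_ ?_) <;> (try dsimp only) <;> (try ring)
      · convert hM using 7 <;> (try ring)
    · -- f = 1 : row x, forward, i = y
      have h0 := (hM 0 (by omega)).1
      have hl := (hM (pattern.length - 1) (by omega)).1
      simp only [pvInb] at h0 hl
      push_cast [Nat.cast_sub (by omega : 1 ≤ pattern.length)] at h0 hl
      refine Or.inl (Or.inl ⟨x, ⟨by omega, by omega⟩, Or.inl ?_⟩)
      rw [mem_pvS_line board pattern h2 _ (by omega) (fun i => (x, i)) 0 1
        (by intro m; refine Prod.ext ?_ ?_ <;> (try dsimp only) <;> (try ring)) (by intro m hm0 hmn; simp only [pvInb]; (try dsimp only); omega)]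
      refine ⟨y, by omega, by omega, Or.inl ⟨?_, ?_⟩⟩
      · refine Prod.ext ?_ (Prod.ext ?_ ?_) <;> (try dsimp only) <;> (try ring)
      · convert hM using 7 <;> (try ring)
    · -- f = 2 : diagonal, forward
      have h0 := (hM 0 (by omega)).1
      have hl := (hM (pattern.length - 1) (by omega)).1
      simp only [pvInb] at h0 hl
      push_cast [Nat.cast_sub (by omega : 1 ≤ pattern.length)] at h0 hl
      by_cases hxy : x ≤ y
      · refine Or.inl (Or.inr ⟨y - x, ⟨by omega, by omega⟩, Or.inl ?_⟩)
        rw [mem_pvS_line board pattern h2 _ (by omega) (fun i => (i, (y - x) + i)) 1 1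
          (by intro m; refine Prod.ext ?_ ?_ <;> (try dsimp only) <;> (try ring)) (by intro m hm0 hmn; simp only [pvInb]; (try dsimp only); omega)]
        refine ⟨x, by omega, by omega, Or.inl ⟨?_, ?_⟩⟩
        · refine Prod.ext ?_ (Prod.ext ?_ ?_) <;> (try dsimp only) <;> (try ring)
        · convert hM using 7 <;> (try ring)
      · refine Or.inr ⟨x - y, ⟨by omega, by omega⟩, Or.inl ?_⟩
        rw [mem_pvS_line board pattern h2 _ (by omega) (fun i => ((x - y) + i, i)) 1 1
          (by intro m; refine Prod.ext ?_ ?_ <;> (try dsimp only) <;> (try ring)) (by intro m hm0 hmn; simp only [pvInb]; (try dsimp only); omega)]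
        refine ⟨y, by omega, by omega, Or.inl ⟨?_, ?_⟩⟩
        · refine Prod.ext ?_ (Prod.ext ?_ ?_) <;> (try dsimp only) <;> (try ring)
        · convert hM using 7 <;> (try ring)
    · -- f = 3 : anti-diagonal, forward
      have h0 := (hM 0 (by omega)).1
      have hl := (hM (pattern.length - 1) (by omega)).1
      simp only [pvInb] at h0 hl
      push_cast [Nat.cast_sub (by omega : 1 ≤ pattern.length)] at h0 hl
      by_cases hxy : x + y ≤ (board.length : Int) - 1
      · refine Or.inl (Or.inr ⟨x + y, ⟨by omega, by omega⟩, Or.inr ?_⟩)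
        rw [mem_pvS_line board pattern h2 _ (by omega) (fun i => (i, (x + y) - i)) 1 (-1)
          (by intro m; refine Prod.ext ?_ ?_ <;> (try dsimp only) <;> (try ring)) (by intro m hm0 hmn; simp only [pvInb]; (try dsimp only); omega)]
        refine ⟨x, by omega, by omega, Or.inl ⟨?_, ?_⟩⟩
        · refine Prod.ext ?_ (Prod.ext ?_ ?_) <;> (try dsimp only) <;> (try ring)
        · convert hM using 7 <;> (try ring)
      · refine Or.inr ⟨x + y - ((board.length : Int) - 1), ⟨by omega, by omega⟩, Or.inr ?_⟩
        rw [mem_pvS_line board pattern h2 _ (by omega) (fun i => ((x + y - ((board.length : Int) - 1)) + i, (board.length : Int) - 1 - i)) 1 (-1)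
          (by intro m; refine Prod.ext ?_ ?_ <;> (try dsimp only) <;> (try ring)) (by intro m hm0 hmn; simp only [pvInb]; (try dsimp only); omega)]
        refine ⟨(board.length : Int) - 1 - y, by omega, by omega, Or.inl ⟨?_, ?_⟩⟩
        · refine Prod.ext ?_ (Prod.ext ?_ ?_) <;> (try dsimp only) <;> (try ring)
        · convert hM using 7 <;> (try ring)
    · -- f = 4 : column y, reverse
      have h0 := (hM 0 (by omega)).1
      have hl := (hM (pattern.length - 1) (by omega)).1
      simp only [pvInb] at h0 hl
      push_cast [Nat.cast_sub (by omega : 1 ≤ pattern.length)] at h0 hl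
      refine Or.inl (Or.inl ⟨y, ⟨by omega, by omega⟩, Or.inr ?_⟩)
      rw [mem_pvS_line board pattern h2 _ (by omega) (fun i => (i, y)) 1 0
        (by intro m; refine Prod.ext ?_ ?_ <;> (try dsimp only) <;> (try ring)) (by intro m hm0 hmn; simp only [pvInb]; (try dsimp only); omega)]
      refine ⟨x - ((pattern.length : Int) - 1), by omega, by omega, Or.inr ⟨hne, ?_, ?_⟩⟩
      · refine Prod.ext ?_ (Prod.ext ?_ ?_) <;> (try dsimp only) <;> (try ring)
      · convert hM using 7 <;> (try ring)
    · -- f = 5 : row x, reverse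
      have h0 := (hM 0 (by omega)).1
      have hl := (hM (pattern.length - 1) (by omega)).1
      simp only [pvInb] at h0 hl
      push_cast [Nat.cast_sub (by omega : 1 ≤ pattern.length)] at h0 hl
      refine Or.inl (Or.inl ⟨x, ⟨by omega, by omega⟩, Or.inl ?_⟩)
      rw [mem_pvS_line board pattern h2 _ (by omega) (fun i => (x, i)) 0 1
        (by intro m; refine Prod.ext ?_ ?_ <;> (try dsimp only) <;> (try ring)) (by intro m hm0 hmn; simp only [pvInb]; (try dsimp only); omega)]
      refine ⟨y - ((pattern.length : Int) - 1), by omega, by omega, Or.inr ⟨hne, ?_, ?_⟩⟩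
      · refine Prod.ext ?_ (Prod.ext ?_ ?_) <;> (try dsimp only) <;> (try ring)
      · convert hM using 7 <;> (try ring)
    · -- f = 6 : diagonal, reverse
      have h0 := (hM 0 (by omega)).1
      have hl := (hM (pattern.length - 1) (by omega)).1
      simp only [pvInb] at h0 hl
      push_cast [Nat.cast_sub (by omega : 1 ≤ pattern.length)] at h0 hl
      by_cases hxy : x ≤ y
      · refine Or.inl (Or.inr ⟨y - x, ⟨by omega, by omega⟩, Or.inl ?_⟩)
        rw [mem_pvS_line board pattern h2 _ (by omega) (fun i => (i, (y - x) + i)) 1 1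
          (by intro m; refine Prod.ext ?_ ?_ <;> (try dsimp only) <;> (try ring)) (by intro m hm0 hmn; simp only [pvInb]; (try dsimp only); omega)]
        refine ⟨x - ((pattern.length : Int) - 1), by omega, by omega, Or.inr ⟨hne, ?_, ?_⟩⟩
        · refine Prod.ext ?_ (Prod.ext ?_ ?_) <;> (try dsimp only) <;> (try ring)
        · convert hM using 7 <;> (try ring)
      · refine Or.inr ⟨x - y, ⟨by omega, by omega⟩, Or.inl ?_⟩
        rw [mem_pvS_line board pattern h2 _ (by omega) (fun i => ((x - y) + i, i)) 1 1
          (by intro m; refine Prod.ext ?_ ?_ <;> (try dsimp only) <;> (try ring)) (by intro m hm0 hmn; simp only [pvInb]; (try dsimp only); omega)]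
        refine ⟨y - ((pattern.length : Int) - 1), by omega, by omega, Or.inr ⟨hne, ?_, ?_⟩⟩
        · refine Prod.ext ?_ (Prod.ext ?_ ?_) <;> (try dsimp only) <;> (try ring)
        · convert hM using 7 <;> (try ring)
    · -- f = 7 : anti-diagonal, reverse
      have h0 := (hM 0 (by omega)).1
      have hl := (hM (pattern.length - 1) (by omega)).1
      simp only [pvInb] at h0 hl
      push_cast [Nat.cast_sub (by omega : 1 ≤ pattern.length)] at h0 hl
      by_cases hxy : x + y ≤ (board.length : Int) - 1
      · refine Or.inl (Or.inr ⟨x + y, ⟨by omega, by omega⟩, Or.inr ?_⟩)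
        rw [mem_pvS_line board pattern h2 _ (by omega) (fun i => (i, (x + y) - i)) 1 (-1)
          (by intro m; refine Prod.ext ?_ ?_ <;> (try dsimp only) <;> (try ring)) (by intro m hm0 hmn; simp only [pvInb]; (try dsimp only); omega)]
        refine ⟨x - ((pattern.length : Int) - 1), by omega, by omega, Or.inr ⟨hne, ?_, ?_⟩⟩
        · refine Prod.ext ?_ (Prod.ext ?_ ?_) <;> (try dsimp only) <;> (try ring)
        · convert hM using 7 <;> (try ring)
      · refine Or.inr ⟨x + y - ((board.length : Int) - 1), ⟨by omega, by omega⟩, Or.inr ?_⟩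
        rw [mem_pvS_line board pattern h2 _ (by omega) (fun i => ((x + y - ((board.length : Int) - 1)) + i, (board.length : Int) - 1 - i)) 1 (-1)
          (by intro m; refine Prod.ext ?_ ?_ <;> (try dsimp only) <;> (try ring)) (by intro m hm0 hmn; simp only [pvInb]; (try dsimp only); omega)]
        refine ⟨(board.length : Int) - y - (pattern.length : Int), by omega, by omega,
          Or.inr ⟨hne, ?_, ?_⟩⟩
        · refine Prod.ext ?_ (Prod.ext ?_ ?_) <;> (try dsimp only) <;> (try ring)
        · convert hM using 7 <;> (try ring)

lemma nodup_B (board : List (List Int)) (pattern : List Int) (h2 : 2 ≤ pattern.length) :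
    (pvH board pattern).Nodup := by
  have hk1 : (1:Int) ≤ (pattern.length : Int) := by push_cast; omega
  have hn0 : (0:Int) ≤ (board.length : Int) := by positivity
  have hS := shape_pvS_line board pattern pattern.reverse (pattern.reverse == pattern)
      (pattern.length : Int) hk1
  simp only [pvH]
  rw [List.nodup_append, List.nodup_append]
  refine ⟨⟨?_, ?_, ?_⟩, ?_, ?_⟩
  · -- rows/columns family
    rw [List.nodup_flatMap]
    constructor
    · intro r _
      rw [List.nodup_append]
      refine ⟨?_, ?_, ?_⟩
      · exact nodup_pvS_line board pattern pattern.reverse _ _ hk1 _ hn0 _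
          (by intro i j hij; simpa using congrArg Prod.snd hij) 1
      · exact nodup_pvS_line board pattern pattern.reverse _ _ hk1 _ hn0 _
          (by intro i j hij; simpa using congrArg Prod.fst hij) 0
      · intro t htA t' htB heq
        subst heq
        obtain ⟨fA, -⟩ := hS _ hn0 _ 1 t htA
        obtain ⟨fB, -⟩ := hS _ hn0 _ 0 t htB
        omega
    · refine List.Pairwise.imp_of_mem ?_
        (PySem.List.pairwise_lt_pyRange_one 0 (board.length : Int))
      intro r r' _ _ hlt t ht ht'
      rcases List.mem_append.mp ht with hA | hA <;> rcases List.mem_append.mp ht' with hB | hB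
      · obtain ⟨-, iA, -, -, eA, -⟩ := hS _ hn0 _ 1 t hA
        obtain ⟨-, iB, -, -, eB, -⟩ := hS _ hn0 _ 1 t hB
        dsimp only at eA eB
        omega
      · obtain ⟨fA, -⟩ := hS _ hn0 _ 1 t hA
        obtain ⟨fB, -⟩ := hS _ hn0 _ 0 t hB
        omega
      · obtain ⟨fA, -⟩ := hS _ hn0 _ 0 t hA
        obtain ⟨fB, -⟩ := hS _ hn0 _ 1 t hB
        omega
      · obtain ⟨-, iA, -, -, -, eA⟩ := hS _ hn0 _ 0 t hA
        obtain ⟨-, iB, -, -, -, eB⟩ := hS _ hn0 _ 0 t hB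
        dsimp only at eA eB
        omega
  · -- upper diagonals / anti-diagonals family
    rw [List.nodup_flatMap]
    constructor
    · intro s hs
      rw [PySem.List.mem_pyRange_one] at hs
      rw [List.nodup_append]
      refine ⟨?_, ?_, ?_⟩
      · exact nodup_pvS_line board pattern pattern.reverse _ _ hk1 _ (by omega) _
          (by intro i j hij; simpa using congrArg Prod.fst hij) 2
      · exact nodup_pvS_line board pattern pattern.reverse _ _ hk1 _ (by omega) _
          (by intro i j hij; simpa using congrArg Prod.fst hij) 3
      · intro t htA t' htB heq
        subst heq
        obtain ⟨fA, -⟩ := hS _ (by omega) _ 2 t htA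
        obtain ⟨fB, -⟩ := hS _ (by omega) _ 3 t htB
        omega
    · refine List.Pairwise.imp_of_mem ?_
        (PySem.List.pairwise_lt_pyRange_one 0 (board.length : Int))
      intro s s' hs hs' hlt t ht ht'
      rw [PySem.List.mem_pyRange_one] at hs hs'
      rcases List.mem_append.mp ht with hA | hA <;> rcases List.mem_append.mp ht' with hB | hB
      · obtain ⟨-, iA, -, -, eA1, eA2⟩ := hS _ (by omega) _ 2 t hA
        obtain ⟨-, iB, -, -, eB1, eB2⟩ := hS _ (by omega) _ 2 t hB
        dsimp only at eA1 eA2 eB1 eB2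
        omega
      · obtain ⟨fA, -⟩ := hS _ (by omega) _ 2 t hA
        obtain ⟨fB, -⟩ := hS _ (by omega) _ 3 t hB
        omega
      · obtain ⟨fA, -⟩ := hS _ (by omega) _ 3 t hA
        obtain ⟨fB, -⟩ := hS _ (by omega) _ 2 t hB
        omega
      · obtain ⟨-, iA, -, -, eA1, eA2⟩ := hS _ (by omega) _ 3 t hA
        obtain ⟨-, iB, -, -, eB1, eB2⟩ := hS _ (by omega) _ 3 t hB
        dsimp only at eA1 eA2 eB1 eB2
        omega
  · -- rows/columns are flag-disjoint from upper diagonals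
    intro t h1 t' h2' heq
    subst heq
    obtain ⟨r, -, hA⟩ := List.mem_flatMap.mp h1
    obtain ⟨s, hs, hB⟩ := List.mem_flatMap.mp h2'
    rw [PySem.List.mem_pyRange_one] at hs
    have hf1 : t.2.2 = 1 ∨ t.2.2 = 5 ∨ t.2.2 = 0 ∨ t.2.2 = 4 := by
      rcases List.mem_append.mp hA with hA | hA
      · obtain ⟨fA, -⟩ := hS _ hn0 _ 1 t hA
        omega
      · obtain ⟨fA, -⟩ := hS _ hn0 _ 0 t hA
        omega
    have hf2 : t.2.2 = 2 ∨ t.2.2 = 6 ∨ t.2.2 = 3 ∨ t.2.2 = 7 := by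
      rcases List.mem_append.mp hB with hB | hB
      · obtain ⟨fB, -⟩ := hS _ (by omega) _ 2 t hB
        omega
      · obtain ⟨fB, -⟩ := hS _ (by omega) _ 3 t hB
        omega
    omega
  · -- lower diagonals / anti-diagonals family
    rw [List.nodup_flatMap]
    constructor
    · intro s hs
      rw [PySem.List.mem_pyRange_one] at hs
      rw [List.nodup_append]
      refine ⟨?_, ?_, ?_⟩
      · exact nodup_pvS_line board pattern pattern.reverse _ _ hk1 _ (by omega) _
          (by intro i j hij; simpa using congrArg Prod.snd hij) 2
      · exact nodup_pvS_line board pattern pattern.reverse _ _ hk1 _ (by omega) _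
          (by intro i j hij; have := congrArg Prod.fst hij; dsimp only at this; omega) 3
      · intro t htA t' htB heq
        subst heq
        obtain ⟨fA, -⟩ := hS _ (by omega) _ 2 t htA
        obtain ⟨fB, -⟩ := hS _ (by omega) _ 3 t htB
        omega
    · refine List.Pairwise.imp_of_mem ?_
        (PySem.List.pairwise_lt_pyRange_one 1 (board.length : Int))
      intro s s' hs hs' hlt t ht ht'
      rw [PySem.List.mem_pyRange_one] at hs hs'
      rcases List.mem_append.mp ht with hA | hA <;> rcases List.mem_append.mp ht' with hB | hB
      · obtain ⟨-, iA, -, -, eA1, eA2⟩ := hS _ (by omega) _ 2 t hA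
        obtain ⟨-, iB, -, -, eB1, eB2⟩ := hS _ (by omega) _ 2 t hB
        dsimp only at eA1 eA2 eB1 eB2
        omega
      · obtain ⟨fA, -⟩ := hS _ (by omega) _ 2 t hA
        obtain ⟨fB, -⟩ := hS _ (by omega) _ 3 t hB
        omega
      · obtain ⟨fA, -⟩ := hS _ (by omega) _ 3 t hA
        obtain ⟨fB, -⟩ := hS _ (by omega) _ 2 t hB
        omega
      · obtain ⟨-, iA, -, -, eA1, eA2⟩ := hS _ (by omega) _ 3 t hA
        obtain ⟨-, iB, -, -, eB1, eB2⟩ := hS _ (by omega) _ 3 t hB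
        dsimp only at eA1 eA2 eB1 eB2
        omega
  · -- the first two families are disjoint from the lower family
    intro t h12 t' h3 heq
    subst heq
    obtain ⟨s', hs', hC⟩ := List.mem_flatMap.mp h3
    rw [PySem.List.mem_pyRange_one] at hs'
    rcases List.mem_append.mp h12 with h1 | h2'
    · obtain ⟨r, -, hA⟩ := List.mem_flatMap.mp h1
      have hf1 : t.2.2 = 1 ∨ t.2.2 = 5 ∨ t.2.2 = 0 ∨ t.2.2 = 4 := by
        rcases List.mem_append.mp hA with hA | hA
        · obtain ⟨fA, -⟩ := hS _ hn0 _ 1 t hA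
          omega
        · obtain ⟨fA, -⟩ := hS _ hn0 _ 0 t hA
          omega
      have hf2 : t.2.2 = 2 ∨ t.2.2 = 6 ∨ t.2.2 = 3 ∨ t.2.2 = 7 := by
        rcases List.mem_append.mp hC with hC | hC
        · obtain ⟨fC, -⟩ := hS _ (by omega) _ 2 t hC
          omega
        · obtain ⟨fC, -⟩ := hS _ (by omega) _ 3 t hC
          omega
      omega
    · obtain ⟨s, hs, hB⟩ := List.mem_flatMap.mp h2'
      rw [PySem.List.mem_pyRange_one] at hs
      rcases List.mem_append.mp hB with hB | hB <;> rcases List.mem_append.mp hC with hC | hC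
      · obtain ⟨-, iB, -, -, eB1, eB2⟩ := hS _ (by omega) _ 2 t hB
        obtain ⟨-, iC, -, -, eC1, eC2⟩ := hS _ (by omega) _ 2 t hC
        dsimp only at eB1 eB2 eC1 eC2
        omega
      · obtain ⟨fB, -⟩ := hS _ (by omega) _ 2 t hB
        obtain ⟨fC, -⟩ := hS _ (by omega) _ 3 t hC
        omega
      · obtain ⟨fB, -⟩ := hS _ (by omega) _ 3 t hB
        obtain ⟨fC, -⟩ := hS _ (by omega) _ 2 t hC
        omega
      · obtain ⟨-, iB, -, -, eB1, eB2⟩ := hS _ (by omega) _ 3 t hB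
        obtain ⟨-, iC, -, -, eC1, eC2⟩ := hS _ (by omega) _ 3 t hC
        dsimp only at eB1 eB2 eC1 eC2
        omega

lemma case_len_one (board : List (List Int)) (pattern : List Int) (h1 : pattern.length = 1) :
    get_pattern_locations board pattern = get_pattern_locations_alt board pattern := by
  have h1' : (pattern.length : Int) = 1 := by exact_mod_cast h1
  rw [A_eq_flatMap]
  unfold get_pattern_locations_alt
  rw [if_pos h1']
  have hfm : ∀ {α β : Type} (l : List α) (f g : α → List β), (∀ a, f a = g a) →
      List.flatMap f l = List.flatMap g l := fun l f g h => by rw [funext h]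
  refine hfm _ _ _ fun x => ?_
  have hc : (fun y => pvCell board pattern x y) = (fun y =>
      if (PySem.List.pyGet? pattern 0).getD 0 = pvGet board x y then [(x, y, (0 : Int))]
      else []) := by
    funext y
    simp [pvCell, h1]
  rw [hc, flatMap_ite_eq_filter_map]
  congr 1
  apply List.filter_congr
  intro y _
  simp [eq_comm]

-- ===== VERDICT (by name: the statement is the Claim_ definition above) =====
theorem get_pattern_locations_spec : Claim_equal_get_pattern_locations := by
  intro board pattern _ hpre
  unfold Spec_get_pattern_locations
  by_cases h1 : pattern.length = 1
  · exact case_len_one board pattern h1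
  · by_cases hb : board = []
    · subst hb
      simp [get_pattern_locations, get_pattern_locations_alt, h1,
        PySem.List.pyRange_zero, PySem.List.sorted]
    · have hp : pattern ≠ [] := by
        rcases hpre.1 with h | h
        · exact absurd h hb
        · exact h
      have h2 : 2 ≤ pattern.length := by
        have := List.length_pos_iff.mpr hp
        omega
      rw [alt_eq_sorted board pattern h1]
      refine (PySem.List.sorted_eq_of_perm_of_pairwise_lt _ _ _ ?_ (pairwise_A board pattern)).symm
      have hndA : (get_pattern_locations board pattern).Nodup :=
        (pairwise_A board pattern).imp (by intro a b h he; subst he; exact lt_irrefl _ h)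
      rw [List.perm_ext_iff_of_nodup hndA (nodup_B board pattern h2)]
      intro t
      rw [mem_A board pattern h2 t, mem_B board pattern h2 t]
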